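-- pv_equiv track=rewrite | github.com/ArtemHaidei/python-online-marathon | sprint_02/test_1_double_string.py | double_string
-- ===== SOURCE A (Python) =====
-- def double_string(data):
-- 	counter = []
--
-- 	for x in range(len(data)):
-- 		chek_list = []
--
-- 		for i in range(len(data)):
-- 			item = data[x] + data[i]
--
-- 			if item in data and item not in chek_list:
-- 				chek_list.append(item)
-- 		counter += chek_list
--
-- 	return len(counter)
-- ===== SOURCE B (Python) =====
-- def double_string(data):
--     ds = set(data)
--     return sum(1 for x in data for s in ds
--                if s.startswith(x) and s[len(x):] in ds)
-- ===== Notes on version B (the rewrite author's own statement) =====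
-- stated objective: idiomatic
-- what changed: Instead of concatenating every pair data[x]+data[i] and testing the product for membership with a hand-maintained dedup list, B builds set(data) once and, for each x, counts the distinct existing strings that start with data[x] and whose remaining suffix is itself in the set, summing with a generator expression.
import Mathlib
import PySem

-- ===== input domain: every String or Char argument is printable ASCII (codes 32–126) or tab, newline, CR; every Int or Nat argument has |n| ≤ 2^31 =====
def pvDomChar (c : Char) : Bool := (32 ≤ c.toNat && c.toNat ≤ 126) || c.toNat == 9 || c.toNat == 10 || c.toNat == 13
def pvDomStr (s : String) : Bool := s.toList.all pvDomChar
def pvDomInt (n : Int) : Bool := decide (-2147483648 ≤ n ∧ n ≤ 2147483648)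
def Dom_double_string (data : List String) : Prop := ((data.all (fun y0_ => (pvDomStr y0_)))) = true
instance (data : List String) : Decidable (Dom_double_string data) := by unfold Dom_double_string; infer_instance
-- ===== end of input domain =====

-- B replaces A's concatenate-every-pair-and-test search by splitting each distinct existing
-- string into prefix data[x] / suffix and testing the suffix for set membership (idiomatic set-based rewrite).


-- ===== PORT A =====
def double_string (data : List String) : Int :=
  let counter :=
    (PySem.List.pyRange 0 (PySem.List.len data) 1).foldl (fun counter x =>
      let chek_list :=
        (PySem.List.pyRange 0 (PySem.List.len data) 1).foldl (fun chek_list i =>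
          let item := PySem.List.pyGetD data x "" ++ PySem.List.pyGetD data i ""
          if item ∈ data ∧ item ∉ chek_list then chek_list ++ [item] else chek_list) []
      counter ++ chek_list) []
  (counter.length : Int)

-- ===== PORT B =====
def double_string_alt (data : List String) : Int :=
  let ds := PySem.Set.ofList data
  data.foldl (fun total x =>
    total + ((ds.countP (fun s =>
      PySem.Str.startswith s x &&
      decide (PySem.Str.slice s (some (PySem.Str.len x)) none ∈ ds))) : Int)) 0

-- ===== PRECONDITION & SPEC =====
def Spec_double_string (data : List String) (out : Int) : Prop := out = double_string_alt data
instance (data : List String) (out : Int) : Decidable (Spec_double_string data out) := by unfold Spec_double_string; infer_instance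

-- ===== CLAIM (what is proved, stated in full; the proofs are below) =====
def Claim_equal_double_string : Prop := ∀ (data : List String), Dom_double_string data → Spec_double_string data (double_string data)

-- ===== LEMMAS AND PROOFS =====

-- A's inner loop (over the suffix candidates `l`, deduplicating into `cl`), as a named helper
def chekFold (data : List String) (p : String) (l cl : List String) : List String :=
  l.foldl (fun cl t =>
    if (p ++ t) ∈ data ∧ (p ++ t) ∉ cl then cl ++ [p ++ t] else cl) cl

-- the accumulated list stays duplicate-free and collects exactly the existing concatenations p ++ t, t ∈ l
theorem chekFold_spec (data : List String) (p : String) :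
    ∀ (l cl : List String), cl.Nodup →
      (chekFold data p l cl).Nodup ∧
      (∀ y, y ∈ chekFold data p l cl ↔ y ∈ cl ∨ (y ∈ data ∧ ∃ t ∈ l, y = p ++ t)) := by
  intro l
  induction l with
  | nil => intro cl h; simp [chekFold, h]
  | cons t l ih =>
    intro cl h
    by_cases hc : (p ++ t) ∈ data ∧ (p ++ t) ∉ cl
    · have step : chekFold data p (t :: l) cl = chekFold data p l (cl ++ [p ++ t]) := by
        simp [chekFold, hc]
      have hnd : (cl ++ [p ++ t]).Nodup := by
        rw [List.nodup_append]
        refine ⟨h, List.nodup_singleton _, ?_⟩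
        intro a ha b hb
        rcases List.mem_singleton.mp hb with rfl
        exact fun heq => hc.2 (heq ▸ ha)
      obtain ⟨h1, h2⟩ := ih (cl ++ [p ++ t]) hnd
      refine ⟨step ▸ h1, fun y => ?_⟩
      rw [step, h2 y]
      constructor
      · rintro (hy | ⟨hyd, t', ht', rfl⟩)
        · rcases List.mem_append.mp hy with hy | hy
          · exact Or.inl hy
          · simp only [List.mem_singleton] at hy
            exact Or.inr ⟨hy ▸ hc.1, t, by simp, hy⟩
        · exact Or.inr ⟨hyd, t', by simp [ht'], rfl⟩
      · rintro (hy | ⟨hyd, t', ht', rfl⟩)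
        · exact Or.inl (List.mem_append.mpr (Or.inl hy))
        · rcases List.mem_cons.mp ht' with rfl | ht'
          · exact Or.inl (by simp)
          · exact Or.inr ⟨hyd, t', ht', rfl⟩
    · have step : chekFold data p (t :: l) cl = chekFold data p l cl := by
        simp only [chekFold, List.foldl_cons, if_neg hc]
      obtain ⟨h1, h2⟩ := ih cl h
      refine ⟨step ▸ h1, fun y => ?_⟩
      rw [step, h2 y]
      constructor
      · rintro (hy | ⟨hyd, t', ht', rfl⟩)
        · exact Or.inl hy
        · exact Or.inr ⟨hyd, t', by simp [ht'], rfl⟩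
      · rintro (hy | ⟨hyd, t', ht', rfl⟩)
        · exact Or.inl hy
        · rcases List.mem_cons.mp ht' with rfl | ht'
          · rcases not_and_or.mp hc with hnd | hcl
            · exact absurd hyd hnd
            · exact Or.inl (not_not.mp hcl)
          · exact Or.inr ⟨hyd, t', ht', rfl⟩

-- B's per-x test holds of s exactly when s is p ++ t for some t in the list
theorem split_iff (p s : String) (L : List String) :
    (PySem.Str.startswith s p = true ∧ PySem.Str.slice s (some (PySem.Str.len p)) none ∈ L)
      ↔ ∃ t ∈ L, s = p ++ t := by
  have hslice : (PySem.Str.slice s (some (PySem.Str.len p)) none).toList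
      = s.toList.drop p.toList.length := by
    rw [PySem.Str.toList_slice, PySem.Chars.slice_eq_listSlice, PySem.Str.len_eq,
      PySem.List.slice_from_natCast]
  constructor
  · rintro ⟨h1, h2⟩
    rw [PySem.Str.startswith_eq, PySem.Chars.startswith_iff] at h1
    obtain ⟨cs, hcs⟩ := h1
    refine ⟨PySem.Str.slice s (some (PySem.Str.len p)) none, h2, ?_⟩
    apply String.toList_inj.mp
    rw [String.toList_append, hslice, ← hcs, List.drop_left]
  · rintro ⟨t, ht, rfl⟩
    have htl : (p ++ t).toList = p.toList ++ t.toList := String.toList_append ..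
    constructor
    · rw [PySem.Str.startswith_eq, PySem.Chars.startswith_iff, htl]
      exact List.prefix_append _ _
    · have : PySem.Str.slice (p ++ t) (some (PySem.Str.len p)) none = t := by
        apply String.toList_inj.mp
        rw [hslice, htl, List.drop_left]
      rwa [this]

-- per x = p, A's deduplicated inner list and B's filtered set have the same length
theorem inner_eq (data : List String) (p : String) :
    ((chekFold data p data []).length : Int)
      = ((PySem.Set.ofList data).countP (fun s =>
          PySem.Str.startswith s p &&
          decide (PySem.Str.slice s (some (PySem.Str.len p)) none ∈ PySem.Set.ofList data)) : Int) := by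
  obtain ⟨hnd, hmem⟩ := chekFold_spec data p data [] List.nodup_nil
  rw [List.countP_eq_length_filter]
  have hperm : (chekFold data p data []).Perm
      ((PySem.Set.ofList data).filter (fun s =>
          PySem.Str.startswith s p &&
          decide (PySem.Str.slice s (some (PySem.Str.len p)) none ∈ PySem.Set.ofList data))) := by
    rw [List.perm_ext_iff_of_nodup hnd ((PySem.Set.nodup_ofList data).filter _)]
    intro y
    rw [hmem y, List.mem_filter, PySem.Set.mem_ofList]
    simp only [List.not_mem_nil, false_or, Bool.and_eq_true, decide_eq_true_eq,
      PySem.Set.mem_ofList]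
    constructor
    · rintro ⟨hyd, hy⟩
      exact ⟨hyd, (split_iff p y data).mpr hy⟩
    · rintro ⟨hyd, hy⟩
      exact ⟨hyd, (split_iff p y data).mp hy⟩
  rw [hperm.length_eq]

-- A's port, rewritten as a plain fold over data accumulating the deduplicated inner lists
theorem portA_eq (data : List String) :
    double_string data = ((data.foldl (fun counter p => counter ++ chekFold data p data []) []).length : Int) := by
  unfold double_string
  simp only [PySem.List.len_eq]
  rw [PySem.List.foldl_pyRange_pyGetD' data ""
    (fun counter p => counter ++
      (PySem.List.pyRange 0 (data.length:Int)).foldl (fun cl i =>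
        if p ++ PySem.List.pyGetD data i "" ∈ data ∧ p ++ PySem.List.pyGetD data i "" ∉ cl
        then cl ++ [p ++ PySem.List.pyGetD data i ""] else cl) []) [] (le_refl 0)]
  simp only [Int.toNat_zero, List.drop_zero]
  congr 2
  apply PySem.List.foldl_congr_mem
  intro acc p _
  congr 1
  rw [PySem.List.foldl_pyRange_pyGetD' data ""
    (fun cl t => if p ++ t ∈ data ∧ p ++ t ∉ cl then cl ++ [p ++ t] else cl) [] (le_refl 0)]
  simp [chekFold]

-- ===== VERDICT (by name: the statement is the Claim_ definition above) =====
theorem double_string_spec : Claim_equal_double_string := by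
  intro data _
  unfold Spec_double_string double_string_alt
  rw [portA_eq]
  rw [PySem.List.foldl_append_eq_flatMap (fun p => chekFold data p data []) data []]
  rw [PySem.List.foldl_add data _ 0]
  rw [List.nil_append, List.length_flatMap]
  rw [Nat.cast_list_sum, List.map_map, zero_add]
  apply congrArg List.sum
  apply List.map_congr_left
  intro p _
  simpa using inner_eq data p
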